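-- pv_equiv track=rewrite | github.com/Alon-gilad-5/Airbnb-Agentic-System | app/main.py | _score_evidence_sentiment
-- ===== SOURCE A (Python) =====
-- def _score_evidence_sentiment(snippets: list[str]) -> tuple[int, int]:
--     """Return rough positive/negative token counts from evidence snippets."""
--
--     positives = {
--         "clean", "great", "amazing", "comfortable", "friendly", "easy", "quiet",
--         "recommend", "responsive", "helpful", "value", "spacious", "private",
--     }
--     negatives = {
--         "dirty", "dusty", "loud", "noise", "mold", "mould", "issue", "problem",
--         "poor", "slow", "couldn't", "cannot", "bad", "complaint",
--     }
--     pos = 0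
--     neg = 0
--     for snippet in snippets:
--         tokens = [token.strip(".,!?;:()[]{}\"'").lower() for token in snippet.split()]
--         for token in tokens:
--             if not token:
--                 continue
--             if token in positives:
--                 pos += 1
--             if token in negatives:
--                 neg += 1
--     return pos, neg
-- ===== SOURCE B (Python) =====
-- def _score_evidence_sentiment(snippets: list[str]) -> tuple[int, int]:
--     """Return rough positive/negative token counts from evidence snippets."""
--
--     positives = {
--         "clean", "great", "amazing", "comfortable", "friendly", "easy", "quiet",
--         "recommend", "responsive", "helpful", "value", "spacious", "private",
--     }
--     negatives = {
--         "dirty", "dusty", "loud", "noise", "mold", "mould", "issue", "problem",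
--         "poor", "slow", "couldn't", "cannot", "bad", "complaint",
--     }
--     # One pass: flatten and clean every token into a frequency table,
--     # then let the keyword sets drive the lookups.
--     freq = {}
--     for word in (token.strip(".,!?;:()[]{}\"'").lower()
--                  for snippet in snippets for token in snippet.split()):
--         freq[word] = freq.get(word, 0) + 1
--     return (sum(freq.get(w, 0) for w in positives),
--             sum(freq.get(w, 0) for w in negatives))
-- ===== Notes on version B (the rewrite author's own statement) =====
-- stated objective: idiomatic
-- what changed: Replaces A's per-token if-branch counters with one pass that flattens all cleaned tokens into a frequency table and then lets the positive/negative keyword sets drive the totals by table lookup.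
import Mathlib
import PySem

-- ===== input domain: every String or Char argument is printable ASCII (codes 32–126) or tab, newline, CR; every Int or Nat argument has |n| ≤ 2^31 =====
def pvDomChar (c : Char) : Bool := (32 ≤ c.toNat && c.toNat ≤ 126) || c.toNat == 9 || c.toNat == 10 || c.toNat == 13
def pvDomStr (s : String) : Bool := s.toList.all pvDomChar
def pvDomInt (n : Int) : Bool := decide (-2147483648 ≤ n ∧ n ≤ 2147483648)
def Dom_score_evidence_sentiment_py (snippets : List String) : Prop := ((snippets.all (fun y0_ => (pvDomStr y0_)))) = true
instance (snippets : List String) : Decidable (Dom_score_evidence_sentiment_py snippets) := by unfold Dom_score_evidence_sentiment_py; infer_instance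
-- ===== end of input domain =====

-- B replaces A's per-token branch counters with one flattened frequency table
-- queried by the keyword sets (objective: idiomatic; same asymptotic cost).

-- shared constants (the literal keyword sets and the token-cleaning expression of both Pythons)
def pvStripSet : String := ".,!?;:()[]{}\"'"
def pvPositives : List String :=
  ["clean", "great", "amazing", "comfortable", "friendly", "easy", "quiet",
   "recommend", "responsive", "helpful", "value", "spacious", "private"]
def pvNegatives : List String :=
  ["dirty", "dusty", "loud", "noise", "mold", "mould", "issue", "problem",
   "poor", "slow", "couldn't", "cannot", "bad", "complaint"]
def pvClean (token : String) : String :=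
  PySem.Str.lower (PySem.Str.stripChars token pvStripSet)

-- ===== PORT A =====
def score_evidence_sentiment_py (snippets : List String) : Int × Int :=
  snippets.foldl
    (fun (acc : Int × Int) snippet =>
      let tokens := (PySem.Str.split₀ snippet).map pvClean
      tokens.foldl
        (fun (acc : Int × Int) token =>
          if token = "" then acc
          else
            let acc1 := if pvPositives.contains token then (acc.1 + 1, acc.2) else acc
            if pvNegatives.contains token then (acc1.1, acc1.2 + 1) else acc1)
        acc)
    (0, 0)

-- ===== PORT B =====
def score_evidence_sentiment_py_alt (snippets : List String) : Int × Int :=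
  let words := snippets.flatMap (fun snippet => (PySem.Str.split₀ snippet).map pvClean)
  let freq := words.foldl (fun (d : PySem.Dict String Int) w => d.insert w (d.getD w 0 + 1)) PySem.Dict.empty
  ((pvPositives.map (fun w => freq.getD w 0)).sum,
   (pvNegatives.map (fun w => freq.getD w 0)).sum)

-- ===== PRECONDITION & SPEC =====
def Spec_score_evidence_sentiment_py (snippets : List String) (out : Int × Int) : Prop := out = score_evidence_sentiment_py_alt snippets
instance (snippets : List String) (out : Int × Int) : Decidable (Spec_score_evidence_sentiment_py snippets out) := by unfold Spec_score_evidence_sentiment_py; infer_instance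

-- ===== CLAIM (what is proved, stated in full; the proofs are below) =====
def Claim_equal_score_evidence_sentiment_py : Prop := ∀ (snippets : List String), Dom_score_evidence_sentiment_py snippets → Spec_score_evidence_sentiment_py snippets (score_evidence_sentiment_py snippets)

-- ===== LEMMAS AND PROOFS =====

-- on a duplicate-free list, counting matches of t is a membership test
theorem pv_countP_beq (t : String) : ∀ (L : List String), L.Nodup →
    L.countP (fun w => t == w) = if t ∈ L then 1 else 0 := by
  intro L
  induction L with
  | nil => simp
  | cons a L ih =>
    intro h
    rcases List.nodup_cons.mp h with ⟨ha, hL⟩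
    by_cases hta : t = a
    · subst hta
      simp [ih hL, ha]
    · by_cases htL : t ∈ L <;> simp [ih hL, hta, htL]

-- A's inner token loop adds, on top of the running pair, the keyword-token counts.
theorem pv_inner_fold (tokens : List String) (acc : Int × Int) :
    tokens.foldl
      (fun (acc : Int × Int) token =>
        if token = "" then acc
        else
          let acc1 := if pvPositives.contains token then (acc.1 + 1, acc.2) else acc
          if pvNegatives.contains token then (acc1.1, acc1.2 + 1) else acc1)
      acc
    = (acc.1 + (tokens.countP (fun t => pvPositives.contains t) : Int),
       acc.2 + (tokens.countP (fun t => pvNegatives.contains t) : Int)) := by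
  induction tokens generalizing acc with
  | nil => simp
  | cons t ts ih =>
    rw [List.foldl_cons, ih]
    by_cases ht : t = ""
    · subst ht
      simp only [List.countP_cons]
      norm_num [pvPositives, pvNegatives]
    · by_cases hp : t ∈ pvPositives <;> by_cases hn : t ∈ pvNegatives <;>
        simp [ht, hp, hn, Prod.ext_iff] <;> omega

-- A's whole double loop counts the keyword tokens of the flattened cleaned word list.
theorem pv_A_eq (snippets : List String) :
    score_evidence_sentiment_py snippets
    = (((snippets.flatMap (fun s => (PySem.Str.split₀ s).map pvClean)).countP (fun t => pvPositives.contains t) : Int),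
       ((snippets.flatMap (fun s => (PySem.Str.split₀ s).map pvClean)).countP (fun t => pvNegatives.contains t) : Int)) := by
  unfold score_evidence_sentiment_py
  suffices h : ∀ (ss : List String) (acc : Int × Int),
      ss.foldl
        (fun (acc : Int × Int) snippet =>
          let tokens := (PySem.Str.split₀ snippet).map pvClean
          tokens.foldl
            (fun (acc : Int × Int) token =>
              if token = "" then acc
              else
                let acc1 := if pvPositives.contains token then (acc.1 + 1, acc.2) else acc
                if pvNegatives.contains token then (acc1.1, acc1.2 + 1) else acc1)
            acc)
        acc
      = (acc.1 + ((ss.flatMap (fun s => (PySem.Str.split₀ s).map pvClean)).countP (fun t => pvPositives.contains t) : Int),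
         acc.2 + ((ss.flatMap (fun s => (PySem.Str.split₀ s).map pvClean)).countP (fun t => pvNegatives.contains t) : Int)) by
    rw [h]; simp
  intro ss
  induction ss with
  | nil => simp
  | cons s ss ih =>
    intro acc
    rw [List.foldl_cons, ih, pv_inner_fold]
    simp only [List.flatMap_cons, List.countP_append, Prod.ext_iff]
    constructor <;> push_cast <;> ring

-- summing the keyword list's occurrence counts equals counting keyword membership over the word list
theorem pv_sum_count (L : List String) (hL : L.Nodup) (T : List String) :
    (L.map (fun w => (T.count w : Int))).sum = (T.countP (fun t => L.contains t) : Int) := by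
  induction T with
  | nil => simp
  | cons t T ih =>
    simp only [List.count_cons, List.countP_cons]
    have hf : (fun (w : String) => ((T.count w + if t == w then 1 else 0 : Nat) : Int))
        = fun (w : String) => (T.count w : Int) + (if t == w then (1 : Int) else 0) := by
      funext w
      by_cases h : t == w <;> simp [h]
    rw [hf, PySem.List.sum_map_add_int L _ _, ih,
      PySem.List.sum_map_ite_one_zero (fun w => t == w) L, pv_countP_beq t L hL]
    by_cases hmem : t ∈ L <;> simp [hmem]

theorem pv_B_eq (snippets : List String) :
    score_evidence_sentiment_py_alt snippets
    = (((snippets.flatMap (fun s => (PySem.Str.split₀ s).map pvClean)).countP (fun t => pvPositives.contains t) : Int),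
       ((snippets.flatMap (fun s => (PySem.Str.split₀ s).map pvClean)).countP (fun t => pvNegatives.contains t) : Int)) := by
  unfold score_evidence_sentiment_py_alt
  simp only [PySem.Dict.foldl_insert_getD_add_one_eq_counter, PySem.Dict.getD_counter]
  rw [pv_sum_count pvPositives (by decide), pv_sum_count pvNegatives (by decide)]

-- ===== VERDICT (by name: the statement is the Claim_ definition above) =====
theorem score_evidence_sentiment_py_spec : Claim_equal_score_evidence_sentiment_py := by
  intro snippets _
  unfold Spec_score_evidence_sentiment_py
  rw [pv_A_eq, pv_B_eq]
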